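-- pv_equiv track=rewrite | github.com/pe1obw/baseband_config | baseband/baseband.py | _handle_invert
-- ===== SOURCE A (Python) =====
-- def _handle_invert(str_in: str) -> str:
--     """
--     Handle invert command in OSD contents.
--     Character values between \\i and \\u are inverted, i.e., 0x80 is added to the ASCII values.
--     """
--     start : int = 0
--     out: str = str_in
--     while True:
--         start = str_in.find('\\i', start)
--         if start == -1:
--             break
--         out = str_in[:start]
--         start += 2  # Move to the character after the found substring
--         end = str_in.find('\\u', start)
--         if end == -1:
--             end = len(str_in)
--         # Invert the substring by adding 0x80 to the ASCII value of each character
--         for c in str_in[start:end]: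
--             out += chr(ord(c) + 128)
--         end += 2  # Move to the character after the found substring
--         out += str_in[end:]
--         start = end
--     return out
-- ===== SOURCE B (Python) =====
-- import re
--
-- def _handle_invert(str_in: str) -> str:
--     """Invert (add 0x80 to) the characters of every \\i...\\u region, dropping the markers."""
--     return re.sub(
--         r'\\i(.*?)(?:\\u|\Z)',
--         lambda m: ''.join(chr(ord(c) + 128) for c in m.group(1)),
--         str_in,
--         flags=re.DOTALL,
--     )
-- ===== Notes on version B (the rewrite author's own statement) =====
-- stated objective: simpler
-- what changed: Replaces A's interleaved find/rebuild while-loop with a single re.sub that inverts every \i...\u region in one pass.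
-- intended difference: On inputs containing two or more \i...\u regions A returns the string with only the LAST region inverted and un-marked (its while-loop rebuilds the output from scratch each pass, discarding earlier passes), while B inverts every region as the docstring intends. — e.g. on _handle_invert("\\i\\u\\i\\u"): A returns "\\i\\u", B returns ""
import Mathlib
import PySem

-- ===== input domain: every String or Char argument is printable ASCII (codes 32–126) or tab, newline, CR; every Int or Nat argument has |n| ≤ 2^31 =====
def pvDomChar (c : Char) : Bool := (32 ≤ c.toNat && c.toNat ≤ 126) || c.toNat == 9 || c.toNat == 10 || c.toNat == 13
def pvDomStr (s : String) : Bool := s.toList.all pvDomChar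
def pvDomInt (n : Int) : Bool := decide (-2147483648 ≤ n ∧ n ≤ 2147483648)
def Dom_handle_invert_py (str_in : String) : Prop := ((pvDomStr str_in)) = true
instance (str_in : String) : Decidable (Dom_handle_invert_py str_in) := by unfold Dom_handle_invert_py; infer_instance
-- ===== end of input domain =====

-- B inverts every \i…\u region in one left-to-right substitution pass (re.sub in Python)
-- instead of A's find/rebuild while-loop; objective: simpler.

-- ===== PORT A =====
-- chr(ord(c) + 128)
def pvInvChar (c : Char) : Char := Char.ofNat (c.toNat + 128)

-- A's `while True` loop; `fuel` only makes the recursion total (each pass moves `start`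
-- forward by at least 2, so `cs.length + 1` passes are never exhausted).
def pvLoopA (cs : List Char) : Nat → Nat → List Char → List Char
  | 0, _, out => out
  | fuel+1, start, out =>
    let s := PySem.Chars.findFrom cs ['\\', 'i'] (start : Int) none
    if s = -1 then out
    else
      let start1 := s.toNat + 2
      let e := PySem.Chars.findFrom cs ['\\', 'u'] ((start1 : Nat) : Int) none
      let e1 := if e = -1 then cs.length else e.toNat
      -- out = str_in[:start]; for c in str_in[start:end]: out += chr(ord(c)+128)
      let out1 := ((cs.drop start1).take (e1 - start1)).foldl
                    (fun acc c => acc ++ [pvInvChar c]) (cs.take s.toNat)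
      -- end += 2; out += str_in[end:]
      pvLoopA cs fuel (e1 + 2) (out1 ++ cs.drop (e1 + 2))

def handle_invert_py (str_in : String) : String :=
  String.ofList (pvLoopA str_in.toList (str_in.toList.length + 1) 0 str_in.toList)

-- ===== PORT B =====
-- chr(ord(c) + 128)
def pvInvCharB (c : Char) : Char := Char.ofNat (c.toNat + 128)

-- Hand-port of re.sub(r'\\i(.*?)(?:\\u|\Z)', <invert group 1>, s, re.DOTALL): exact for
-- THIS pattern — copy up to the next '\i', replace the non-greedy group (everything up to
-- the first '\u' after it, or the end of the string) by its inverted characters, resume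
-- after the consumed match. `fuel` only makes the recursion total.
def pvSubB (cs : List Char) : Nat → Nat → List Char
  | 0, _ => []
  | fuel+1, pos =>
    let s := PySem.Chars.findFrom cs ['\\', 'i'] (pos : Int) none
    if s = -1 then cs.drop pos
    else
      let e := PySem.Chars.findFrom cs ['\\', 'u'] ((s.toNat + 2 : Nat) : Int) none
      if e = -1 then
        (cs.drop pos).take (s.toNat - pos) ++ ((cs.drop (s.toNat + 2)).map pvInvCharB)
      else
        (cs.drop pos).take (s.toNat - pos)
          ++ ((cs.drop (s.toNat + 2)).take (e.toNat - (s.toNat + 2))).map pvInvCharB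
          ++ pvSubB cs fuel (e.toNat + 2)

def handle_invert_py_alt (str_in : String) : String :=
  String.ofList (pvSubB str_in.toList (str_in.toList.length + 1) 0)

-- ===== PRECONDITION & SPEC =====
-- On inputs with two or more \i…\u regions — i.e. the string carries an '\i' at some p,
-- a '\u' at some e ≥ p+2 closing a region, and another '\i' at some q ≥ e+2 — A returns
-- the string with only the LAST region inverted and un-marked (its loop rebuilds `out`
-- from str_in each pass, discarding earlier passes), while B inverts every region as the
-- docstring intends.
def D_handle_invert_py (str_in : String) : Prop :=
  PySem.Chars.find str_in.toList ['\\', 'i'] ≠ -1 ∧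
  PySem.Chars.findFrom str_in.toList ['\\', 'u']
    (PySem.Chars.find str_in.toList ['\\', 'i'] + 2) none ≠ -1 ∧
  PySem.Chars.findFrom str_in.toList ['\\', 'i']
    (PySem.Chars.findFrom str_in.toList ['\\', 'u']
      (PySem.Chars.find str_in.toList ['\\', 'i'] + 2) none + 2) none ≠ -1
instance (str_in : String) : Decidable (D_handle_invert_py str_in) := by
  unfold D_handle_invert_py; infer_instance

def Spec_handle_invert_py (str_in : String) (out : String) : Prop :=
  ¬ D_handle_invert_py str_in → out = handle_invert_py_alt str_in
instance (str_in : String) (out : String) : Decidable (Spec_handle_invert_py str_in out) := by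
  unfold Spec_handle_invert_py; infer_instance

def pvDiffWitness_handle_invert_py : String := "\\i\\u\\i\\u"
def pvDiffWitnessOut_handle_invert_py : String × String := ("\\i\\u", "")

-- ===== CLAIM (what is proved, stated in full; the proofs are below) =====
def Claim_unchanged_handle_invert_py : Prop :=
  ∀ (str_in : String), Dom_handle_invert_py str_in →
    Spec_handle_invert_py str_in (handle_invert_py str_in)
def Claim_changed_handle_invert_py : Prop :=
  Dom_handle_invert_py (pvDiffWitness_handle_invert_py) ∧
  D_handle_invert_py (pvDiffWitness_handle_invert_py) ∧
  handle_invert_py (pvDiffWitness_handle_invert_py) = pvDiffWitnessOut_handle_invert_py.1 ∧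
  handle_invert_py_alt (pvDiffWitness_handle_invert_py) = pvDiffWitnessOut_handle_invert_py.2 ∧
  pvDiffWitnessOut_handle_invert_py.1 ≠ pvDiffWitnessOut_handle_invert_py.2
def Claim_exact_handle_invert_py : Prop :=
  ∀ (str_in : String), Dom_handle_invert_py str_in → D_handle_invert_py str_in →
    handle_invert_py str_in ≠ handle_invert_py_alt str_in

-- ===== LEMMAS AND PROOFS =====

-- The list of matches of the shared scan: (m.start(), end of the region, m.end()).
def pvMatches (cs : List Char) : Nat → Nat → List (Nat × Nat × Nat)
  | 0, _ => []
  | fuel+1, pos =>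
    let s := PySem.Chars.findFrom cs ['\\', 'i'] (pos : Int) none
    if s = -1 then []
    else
      let e := PySem.Chars.findFrom cs ['\\', 'u'] ((s.toNat + 2 : Nat) : Int) none
      if e = -1 then [(s.toNat, cs.length, cs.length)]
      else (s.toNat, e.toNat, e.toNat + 2) :: pvMatches cs fuel (e.toNat + 2)

theorem pv_findFrom_ge (cs : List Char) (sub : List Char) (hs : sub ≠ []) (k : Nat)
    (h : cs.length ≤ k) : PySem.Chars.findFrom cs sub (k : Int) none = -1 := by
  have hnil : PySem.Chars.find ([] : List Char) sub = -1 := by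
    rw [PySem.Chars.find_eq_neg_one_iff]
    intro hinf
    exact hs (List.eq_nil_of_infix_nil hinf)
  simp only [PySem.Chars.findFrom]
  have h0 : ¬ ((k : Int) < 0) := by omega
  rw [if_neg h0]
  by_cases hlt : (cs.length : Int) < (k : Int)
  · rw [if_pos hlt]
  · have hk : k = cs.length := by omega
    subst hk
    simp [hnil]

theorem pv_foldl_append_map (f : Char → Char) (l : List Char) (init : List Char) :
    l.foldl (fun acc c => acc ++ [f c]) init = init ++ l.map f := by
  induction l generalizing init with
  | nil => simp
  | cons a t ih => simp [List.foldl_cons, ih]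

-- a successful findFrom: pos ≤ result, the pattern sits at result, result + |sub| ≤ |cs|
theorem pv_findFrom_bounds (cs sub : List Char) (hs : sub ≠ []) (pos : Nat)
    (h : PySem.Chars.findFrom cs sub (pos : Int) none ≠ -1) :
    pos ≤ (PySem.Chars.findFrom cs sub (pos : Int) none).toNat ∧
    sub <+: cs.drop (PySem.Chars.findFrom cs sub (pos : Int) none).toNat ∧
    (PySem.Chars.findFrom cs sub (pos : Int) none).toNat + sub.length ≤ cs.length := by
  have hple : pos ≤ cs.length := by
    by_contra hgt
    exact h (pv_findFrom_ge cs sub hs pos (by omega))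
  obtain ⟨h1, h2, -⟩ := PySem.Chars.findFrom_natCast_spec cs sub pos hple h
  have h3 := h2.length_le
  rw [List.length_drop] at h3
  have hpos : 0 < sub.length := by
    cases sub with
    | nil => exact absurd rfl hs
    | cons a t => simp
  exact ⟨by omega, h2, by omega⟩

-- result of applying ONE match (the last one A keeps): prefix + inverted region + tail
def pvRecon (cs : List Char) (x : Nat × Nat × Nat) : List Char :=
  cs.take x.1 ++ ((cs.drop (x.1 + 2)).take (x.2.1 - (x.1 + 2))).map pvInvChar ++ cs.drop x.2.2

-- A's loop keeps only the last match
theorem pv_loopA_eq_matches (cs : List Char) (fuel : Nat) :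
    ∀ (start : Nat) (out : List Char),
      pvLoopA cs fuel start out =
        (match (pvMatches cs fuel start).getLast? with
         | none => out
         | some x => pvRecon cs x) := by
  induction fuel with
  | zero => intro start out; simp [pvLoopA, pvMatches]
  | succ fuel ih =>
    intro start out
    rw [pvLoopA, pvMatches]
    by_cases hs : PySem.Chars.findFrom cs ['\\', 'i'] (start : Int) none = -1
    · simp [hs]
    · simp only [if_neg hs]
      set s := PySem.Chars.findFrom cs ['\\', 'i'] (start : Int) none with hsdef
      by_cases he : PySem.Chars.findFrom cs ['\\', 'u'] ((s.toNat + 2 : Nat) : Int) none = -1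
      · -- no '\u': the match ends at cs.length; the loop jumps to cs.length + 2 and stops.
        simp only [if_pos he]
        have hloop : ∀ o, pvLoopA cs fuel (cs.length + 2) o = o := by
          intro o
          cases fuel with
          | zero => rfl
          | succ fuel' =>
            rw [pvLoopA]
            rw [pv_findFrom_ge cs ['\\', 'i'] (by simp) (cs.length + 2) (by omega)]
            simp
        rw [hloop]
        simp only [List.getLast?_singleton]
        rw [pv_foldl_append_map]
        have h1 : cs.drop (cs.length + 2) = ([] : List Char) := List.drop_eq_nil_of_le (by omega)
        simp [pvRecon, h1]
      · -- '\u' found at e: the current match is (s, e, e+2); recurse at e+2.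
        simp only [if_neg he]
        set e := PySem.Chars.findFrom cs ['\\', 'u'] ((s.toNat + 2 : Nat) : Int) none with hedef
        rw [ih (e.toNat + 2)]
        cases hres : (pvMatches cs fuel (e.toNat + 2)).getLast? with
        | none =>
          have hnil : pvMatches cs fuel (e.toNat + 2) = [] :=
            List.getLast?_eq_none_iff.mp hres
          rw [hnil]
          simp only [List.getLast?_singleton]
          rw [pv_foldl_append_map]
          simp [pvRecon]
        | some x =>
          have hne : pvMatches cs fuel (e.toNat + 2) ≠ [] := by
            intro hnil; rw [hnil] at hres; simp at hres
          obtain ⟨y, t, hyt⟩ := List.exists_cons_of_ne_nil hne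
          rw [hyt] at hres ⊢
          rw [List.getLast?_cons_cons, hres]

-- B's substitution pass, when there is at most one match, produces the same one-match
-- reconstruction (fuel is ample: cs.length + 1 ≤ fuel + pos).
theorem pv_subB_eq_matches (cs : List Char) (fuel : Nat) :
    ∀ (pos : Nat), cs.length + 1 ≤ fuel + pos → (pvMatches cs fuel pos).length ≤ 1 →
      pvSubB cs fuel pos =
        (match (pvMatches cs fuel pos).getLast? with
         | none => cs.drop pos
         | some x =>
             (cs.drop pos).take (x.1 - pos)
               ++ ((cs.drop (x.1 + 2)).take (x.2.1 - (x.1 + 2))).map pvInvCharB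
               ++ cs.drop x.2.2) := by
  induction fuel with
  | zero =>
    intro pos hfuel _
    have : cs.drop pos = ([] : List Char) := List.drop_eq_nil_of_le (by omega)
    simp [pvSubB, pvMatches, this]
  | succ fuel ih =>
    intro pos hfuel hlen
    rw [pvSubB, pvMatches] at *
    by_cases hs : PySem.Chars.findFrom cs ['\\', 'i'] (pos : Int) none = -1
    · simp [hs]
    · simp only [if_neg hs] at hlen ⊢
      set s := PySem.Chars.findFrom cs ['\\', 'i'] (pos : Int) none with hsdef
      obtain ⟨hs1, -, hs2⟩ := pv_findFrom_bounds cs ['\\', 'i'] (by simp) pos hs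
      by_cases he : PySem.Chars.findFrom cs ['\\', 'u'] ((s.toNat + 2 : Nat) : Int) none = -1
      · simp only [if_pos he]
        simp only [List.getLast?_singleton]
        have htake : (cs.drop (s.toNat + 2)).take (cs.length - (s.toNat + 2))
            = cs.drop (s.toNat + 2) := List.take_of_length_le (by simp)
        have hdrop : cs.drop cs.length = ([] : List Char) := List.drop_eq_nil_of_le le_rfl
        simp [htake, hdrop]
      · simp only [if_neg he] at hlen ⊢
        set e := PySem.Chars.findFrom cs ['\\', 'u'] ((s.toNat + 2 : Nat) : Int) none with hedef
        obtain ⟨he1, -, he2⟩ := pv_findFrom_bounds cs ['\\', 'u'] (by simp) (s.toNat + 2) he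
        have htail : pvMatches cs fuel (e.toNat + 2) = [] := by
          have : (pvMatches cs fuel (e.toNat + 2)).length = 0 := by
            simp only [List.length_cons] at hlen; omega
          exact List.length_eq_zero_iff.mp this
        have hrec := ih (e.toNat + 2) (by simp at hs2; omega) (by rw [htail]; simp)
        rw [htail] at hrec
        simp only [List.getLast?_nil] at hrec
        rw [hrec, htail]
        simp only [List.getLast?_singleton]

-- a nonempty match list means the '\i' search from pos succeeds
theorem pv_matches_head (cs : List Char) (fuel pos : Nat)
    (h : pvMatches cs fuel pos ≠ []) :
    PySem.Chars.findFrom cs ['\\', 'i'] (pos : Int) none ≠ -1 := by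
  cases fuel with
  | zero => exact absurd rfl h
  | succ fuel =>
    rw [pvMatches] at h
    by_cases hs : PySem.Chars.findFrom cs ['\\', 'i'] (pos : Int) none = -1
    · rw [if_pos hs] at h; exact absurd rfl h
    · exact hs

-- two or more matches (scanning from 0) put the input inside D_
theorem pv_two_matches_D (str_in : String) (fuel : Nat)
    (h : 2 ≤ (pvMatches str_in.toList fuel 0).length) : D_handle_invert_py str_in := by
  cases fuel with
  | zero => simp [pvMatches] at h
  | succ fuel =>
    rw [pvMatches] at h
    have hz : ((0 : Nat) : Int) = (0 : Int) := rfl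
    rw [hz, PySem.Chars.findFrom_zero] at h
    by_cases hs : PySem.Chars.find str_in.toList ['\\', 'i'] = -1
    · rw [if_pos hs] at h; simp at h
    · rw [if_neg hs] at h
      set st := PySem.Chars.find str_in.toList ['\\', 'i'] with hstdef
      have hst0 : 0 ≤ st := by
        have := PySem.Chars.neg_one_le_find str_in.toList ['\\', 'i']
        omega
      have hcast : ((st.toNat + 2 : Nat) : Int) = st + 2 := by omega
      by_cases he : PySem.Chars.findFrom str_in.toList ['\\', 'u']
          ((st.toNat + 2 : Nat) : Int) none = -1
      · rw [if_pos he] at h; simp at h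
      · rw [if_neg he] at h
        obtain ⟨he1, -, -⟩ :=
          pv_findFrom_bounds str_in.toList ['\\', 'u'] (by simp) (st.toNat + 2) he
        set e := PySem.Chars.findFrom str_in.toList ['\\', 'u'] ((st.toNat + 2 : Nat) : Int) none
          with hedef
        have he0 : 0 ≤ e := by omega
        have hcast2 : ((e.toNat + 2 : Nat) : Int) = e + 2 := by omega
        have htail : pvMatches str_in.toList fuel (e.toNat + 2) ≠ [] := by
          intro hnil
          rw [hnil] at h
          simp at h
        have hq := pv_matches_head str_in.toList fuel (e.toNat + 2) htail
        rw [hcast2] at hq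
        unfold D_handle_invert_py
        rw [← hstdef, ← hcast, ← hedef]
        exact ⟨hs, he, hq⟩


-- every recorded match is well-placed: markers inside the string, region non-degenerate
theorem pv_matches_mem_inv (cs : List Char) (fuel : Nat) :
    ∀ pos x, x ∈ pvMatches cs fuel pos →
      x.1 + 2 ≤ x.2.1 ∧ x.2.1 ≤ cs.length ∧ x.2.2 ≤ x.2.1 + 2 ∧ x.2.2 ≤ cs.length := by
  induction fuel with
  | zero => intro pos x hx; simp [pvMatches] at hx
  | succ fuel ih =>
    intro pos x hx
    rw [pvMatches] at hx
    by_cases hs : PySem.Chars.findFrom cs ['\\', 'i'] (pos : Int) none = -1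
    · rw [if_pos hs] at hx; simp at hx
    · rw [if_neg hs] at hx
      obtain ⟨-, -, hs3⟩ := pv_findFrom_bounds cs ['\\', 'i'] (by simp) pos hs
      simp only [List.length_cons, List.length_nil] at hs3
      set st := PySem.Chars.findFrom cs ['\\', 'i'] (pos : Int) none with hstdef
      by_cases he : PySem.Chars.findFrom cs ['\\', 'u'] ((st.toNat + 2 : Nat) : Int) none = -1
      · rw [if_pos he] at hx
        simp only [List.mem_singleton] at hx
        subst hx
        dsimp only
        exact ⟨by omega, le_rfl, by omega, le_rfl⟩
      · rw [if_neg he] at hx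
        obtain ⟨he1, -, he3⟩ := pv_findFrom_bounds cs ['\\', 'u'] (by simp) (st.toNat + 2) he
        simp only [List.length_cons, List.length_nil] at he3
        rcases List.mem_cons.mp hx with hx | hx
        · subst hx
          dsimp only
          exact ⟨by omega, by omega, by omega, by omega⟩
        · exact ih _ x hx

-- length accounting for B: each match removes at least its two markers (4 chars when
-- closed, the final '\u' bookkeeping giving the +2 slack)
theorem pv_subB_len (cs : List Char) (fuel : Nat) :
    ∀ pos, cs.length + 1 ≤ fuel + pos → pos ≤ cs.length + 2 →
      (pvSubB cs fuel pos).length + 4 * (pvMatches cs fuel pos).length + pos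
        ≤ cs.length + 2 := by
  induction fuel with
  | zero =>
    intro pos h hp
    simp only [pvSubB, pvMatches, List.length_nil, Nat.mul_zero, Nat.add_zero, Nat.zero_add]
    omega
  | succ fuel ih =>
    intro pos h hp
    rw [pvSubB, pvMatches]
    by_cases hs : PySem.Chars.findFrom cs ['\\', 'i'] (pos : Int) none = -1
    · rw [if_pos hs, if_pos hs]
      simp only [List.length_drop, List.length_nil]
      omega
    · rw [if_neg hs, if_neg hs]
      obtain ⟨hs1, -, hs3⟩ := pv_findFrom_bounds cs ['\\', 'i'] (by simp) pos hs
      simp only [List.length_cons, List.length_nil] at hs3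
      set st := PySem.Chars.findFrom cs ['\\', 'i'] (pos : Int) none with hstdef
      by_cases he : PySem.Chars.findFrom cs ['\\', 'u'] ((st.toNat + 2 : Nat) : Int) none = -1
      · rw [if_pos he, if_pos he]
        simp only [List.length_append, List.length_take, List.length_drop, List.length_map,
          List.length_cons, List.length_nil]
        omega
      · rw [if_neg he, if_neg he]
        obtain ⟨he1, -, he3⟩ := pv_findFrom_bounds cs ['\\', 'u'] (by simp) (st.toNat + 2) he
        simp only [List.length_cons, List.length_nil] at he3
        set e := PySem.Chars.findFrom cs ['\\', 'u'] ((st.toNat + 2 : Nat) : Int) none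
          with hedef
        have hrec := ih (e.toNat + 2) (by omega) (by omega)
        simp only [List.length_append, List.length_take, List.length_drop, List.length_map,
          List.length_cons]
        omega

theorem pv_cons_two {α : Type} (x : α) (t : List α) (h : t ≠ []) : 2 ≤ (x :: t).length := by
  cases t with
  | nil => exact absurd rfl h
  | cons y s => simp only [List.length_cons]; omega

theorem pv_ite_cons_ne_nil {α : Type} (c : Prop) [Decidable c] (x y : α) (t : List α) :
    (if c then [x] else y :: t) ≠ [] := by
  split <;> simp

-- D_ puts at least two matches in the scan from 0
theorem pv_D_two_matches (str_in : String) (hD : D_handle_invert_py str_in) :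
    2 ≤ (pvMatches str_in.toList (str_in.toList.length + 1) 0).length := by
  obtain ⟨h1, h2, h3⟩ := hD
  rw [pvMatches]
  have hz : (((0 : Nat)) : Int) = (0 : Int) := rfl
  rw [hz, PySem.Chars.findFrom_zero, if_neg h1]
  set p := PySem.Chars.find str_in.toList ['\\', 'i'] with hpdef
  have hp0 : 0 ≤ p := by
    have := PySem.Chars.neg_one_le_find str_in.toList ['\\', 'i']
    omega
  have hc : ((p.toNat + 2 : Nat) : Int) = p + 2 := by omega
  rw [hc, if_neg h2]
  set e := PySem.Chars.findFrom str_in.toList ['\\', 'u'] (p + 2) none with hedef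
  obtain ⟨he1, -, -⟩ := pv_findFrom_bounds str_in.toList ['\\', 'u'] (by simp) (p.toNat + 2)
    (by rw [hc]; exact h2)
  rw [hc, ← hedef] at he1
  have he0 : 0 ≤ e := by omega
  have hc2 : ((e.toNat + 2 : Nat) : Int) = e + 2 := by omega
  obtain ⟨hq1, -, hq3⟩ := pv_findFrom_bounds str_in.toList ['\\', 'i'] (by simp) (e.toNat + 2)
    (by rw [hc2]; exact h3)
  simp only [List.length_cons, List.length_nil] at hq3
  have hlen : ∃ n, str_in.toList.length = n + 1 := ⟨str_in.toList.length - 1, by omega⟩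
  obtain ⟨n, hn⟩ := hlen
  rw [hn, pvMatches, hc2, if_neg h3]
  exact pv_cons_two _ _ (pv_ite_cons_ne_nil _ _ _ _)

-- ===== VERDICT (by name: the statement is the Claim_ definition above) =====
theorem handle_invert_py_spec : Claim_unchanged_handle_invert_py := by
  intro str_in _ hD
  unfold handle_invert_py handle_invert_py_alt
  have hlen : (pvMatches str_in.toList (str_in.toList.length + 1) 0).length ≤ 1 := by
    by_contra hc
    exact hD (pv_two_matches_D str_in (str_in.toList.length + 1) (by omega))
  rw [pv_loopA_eq_matches, pv_subB_eq_matches str_in.toList (str_in.toList.length + 1) 0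
    (by omega) hlen]
  cases hres : (pvMatches str_in.toList (str_in.toList.length + 1) 0).getLast? with
  | none => simp
  | some x => simp [pvRecon, show pvInvChar = pvInvCharB from rfl]

theorem handle_invert_py_changed : Claim_changed_handle_invert_py := by
  unfold Claim_changed_handle_invert_py; decide

theorem handle_invert_py_tight : Claim_exact_handle_invert_py := by
  intro str_in _ hD hEq
  have h2m := pv_D_two_matches str_in hD
  unfold handle_invert_py handle_invert_py_alt at hEq
  rw [pv_loopA_eq_matches] at hEq
  cases hres : (pvMatches str_in.toList (str_in.toList.length + 1) 0).getLast? with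
  | none =>
    have : pvMatches str_in.toList (str_in.toList.length + 1) 0 = [] :=
      List.getLast?_eq_none_iff.mp hres
    rw [this] at h2m
    simp at h2m
  | some m =>
    rw [hres] at hEq
    have hm : m ∈ pvMatches str_in.toList (str_in.toList.length + 1) 0 := by
      obtain ⟨l', hl'⟩ := List.getLast?_eq_some_iff.mp hres
      rw [hl']
      simp
    obtain ⟨hi1, hi2, hi3, hi4⟩ :=
      pv_matches_mem_inv str_in.toList (str_in.toList.length + 1) 0 m hm
    have hlenB := pv_subB_len str_in.toList (str_in.toList.length + 1) 0 (by omega) (by omega)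
    have hlists := congrArg String.toList hEq
    simp only [String.toList_ofList] at hlists
    have hlen := congrArg List.length hlists
    simp only [pvRecon, List.length_append, List.length_take, List.length_drop,
      List.length_map] at hlen
    omega
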